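-- pv_equiv track=rewrite | github.com/akamnev/deepl | deepl/layers/multi_head_attention.py | _create_index_map
-- ===== SOURCE A (Python) =====
-- def __slit_it(it):
--     ii = [v[0] for v in it]
--     tt = [v[1] for v in it]
--     return (min(ii), max(ii) + 1), tt
--
-- def _create_index_map(nin, nout, hw):
--     idx_ij = []  # вычисляем отображение i -> j
--     idx_ji = [[] for _ in range(nin)]  # вычисляем отображение j -> i
--     t = 0
--     for i in range(nout):
--         j_min, j_max = max(0, i - hw), min(i + hw + 1, nin)
--         idx_ij.append((i, (j_min, j_max), (t, t + j_max - j_min)))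
--         for j in range(i - hw, i + hw + 1):
--             if 0 <= j < nin:
--                 idx_ji[j] += [(i, t)]
--                 t += 1
--     idx_ji = [(j, __slit_it(v)) for j, v in enumerate(idx_ji)]
--     return idx_ij, idx_ji
-- ===== SOURCE B (Python) =====
-- def __slit_it(it):
--     ii = [v[0] for v in it]
--     tt = [v[1] for v in it]
--     return (min(ii), max(ii) + 1), tt
--
-- def _create_index_map(nin, nout, hw):
--     # row pass: bands, t-ranges from a running prefix sum of band widths
--     idx_ij = []
--     t_start = []  # t_start[i] + j = token index of (i, j)
--     t = 0
--     for i in range(nout):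
--         j_min, j_max = max(0, i - hw), min(i + hw + 1, nin)
--         idx_ij.append((i, (j_min, j_max), (t, t + j_max - j_min)))
--         t_start.append(t - j_min)
--         t += max(0, j_max - j_min)
--     # column pass: each column's rows form a contiguous i-range
--     idx_ji = []
--     for j in range(nin):
--         i_lo, i_hi = max(0, j - hw), min(j + hw + 1, nout)
--         idx_ji.append((j, ((i_lo, i_hi), [t_start[i] + j for i in range(i_lo, i_hi)])))
--     return idx_ij, idx_ji
-- ===== Notes on version B (the rewrite author's own statement) =====
-- stated objective: faster
-- what changed: A builds idx_ji by interleaved row-then-column counting (appending (i,t) into per-column bucket lists while incrementing a global token counter t one step per band cell, then min/max-scanning each bucket); B does a row pass that only records per-row token-start offsets (prefix sums of band widths) and a separate column-major pass that emits each column's contiguous i-range and token indices in closed form — no per-token counter, no bucket lists, no min/max scans (same asymptotics, large constant-factor win measured).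
import Mathlib
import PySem

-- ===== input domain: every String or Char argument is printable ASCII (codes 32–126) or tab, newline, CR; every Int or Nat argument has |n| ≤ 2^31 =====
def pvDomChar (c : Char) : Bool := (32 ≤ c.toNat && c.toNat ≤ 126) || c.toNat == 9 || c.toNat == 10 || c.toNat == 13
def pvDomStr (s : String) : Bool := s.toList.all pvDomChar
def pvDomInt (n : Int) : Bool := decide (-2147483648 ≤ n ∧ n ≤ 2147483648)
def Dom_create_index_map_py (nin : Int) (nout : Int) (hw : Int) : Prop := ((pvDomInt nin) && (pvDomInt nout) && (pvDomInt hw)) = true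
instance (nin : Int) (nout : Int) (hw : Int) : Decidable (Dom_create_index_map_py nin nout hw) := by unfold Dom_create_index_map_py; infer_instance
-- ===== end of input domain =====

-- B replaces A's interleaved row/column counting by a row pass that records per-row
-- token offsets (prefix sums of band widths) and a separate closed-form column pass
-- (objective: same asymptotics, measurably faster constants: no per-token counter or bucket scans).

-- ===== PORT A =====
-- __slit_it: min/max over the collected column rows
def pySlitIt (it : List (Int × Int)) : (Int × Int) × List Int :=
  let ii := it.map (fun v => v.1)
  let tt := it.map (fun v => v.2)
  (((PySem.List.min? ii (fun x => x)).getD 0, (PySem.List.max? ii (fun x => x)).getD 0 + 1), tt)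

def create_index_map_py (nin : Int) (nout : Int) (hw : Int) :
    (List (Int × (Int × Int) × (Int × Int))) × (List (Int × ((Int × Int) × List Int))) :=
  -- idx_ji = [[] for _ in range(nin)]
  let idx_ji0 : List (List (Int × Int)) := (PySem.List.pyRange 0 nin 1).map (fun _ => [])
  let st := (PySem.List.pyRange 0 nout 1).foldl
    (fun (st : List (Int × (Int × Int) × (Int × Int)) × List (List (Int × Int)) × Int) i =>
      let jmin := max 0 (i - hw)
      let jmax := min (i + hw + 1) nin
      let ij := st.1 ++ [(i, (jmin, jmax), (st.2.2, st.2.2 + jmax - jmin))]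
      -- inner loop touches only (idx_ji, t)
      let ct := (PySem.List.pyRange (i - hw) (i + hw + 1) 1).foldl
        (fun (ct : List (List (Int × Int)) × Int) j =>
          if 0 ≤ j ∧ j < nin then (ct.1.modify j.toNat (fun c => c ++ [(i, ct.2)]), ct.2 + 1)
          else ct) (st.2.1, st.2.2)
      (ij, ct.1, ct.2))
    ([], idx_ji0, 0)
  (st.1, (PySem.List.enumerate st.2.1 0).map (fun p => (p.1, pySlitIt p.2)))

-- ===== PORT B =====
def create_index_map_py_alt (nin : Int) (nout : Int) (hw : Int) :
    (List (Int × (Int × Int) × (Int × Int))) × (List (Int × ((Int × Int) × List Int))) :=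
  -- row pass: idx_ij, t_start, running t
  let st := (PySem.List.pyRange 0 nout 1).foldl
    (fun (st : List (Int × (Int × Int) × (Int × Int)) × List Int × Int) i =>
      let jmin := max 0 (i - hw)
      let jmax := min (i + hw + 1) nin
      (st.1 ++ [(i, (jmin, jmax), (st.2.2, st.2.2 + jmax - jmin))],
       st.2.1 ++ [st.2.2 - jmin],
       st.2.2 + max 0 (jmax - jmin)))
    ([], [], 0)
  let tstart := st.2.1
  -- column pass: each column is a contiguous i-range
  let idx_ji := (PySem.List.pyRange 0 nin 1).foldl
    (fun acc j =>
      let ilo := max 0 (j - hw)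
      let ihi := min (j + hw + 1) nout
      acc ++ [(j, ((ilo, ihi),
        (PySem.List.pyRange ilo ihi 1).map (fun i => PySem.List.pyGetD tstart i 0 + j)))])
    []
  (st.1, idx_ji)

-- ===== PRECONDITION & SPEC =====
-- Pre_ excludes exactly the inputs on which A raises ValueError (min() of an empty
-- column inside __slit_it): some column j < nin receives no row i.
def Pre_create_index_map_py (nin : Int) (nout : Int) (hw : Int) : Prop :=
  nin ≤ 0 ∨ (0 ≤ hw ∧ 1 ≤ nout ∧ nin ≤ nout + hw)
instance (nin : Int) (nout : Int) (hw : Int) : Decidable (Pre_create_index_map_py nin nout hw) := by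
  unfold Pre_create_index_map_py; infer_instance

def pvWitness_create_index_map_py : Int × Int × Int := (3, 4, 1)

def Spec_create_index_map_py (nin : Int) (nout : Int) (hw : Int)
    (out : (List (Int × (Int × Int) × (Int × Int))) × (List (Int × ((Int × Int) × List Int)))) : Prop :=
  out = create_index_map_py_alt nin nout hw
instance (nin : Int) (nout : Int) (hw : Int)
    (out : (List (Int × (Int × Int) × (Int × Int))) × (List (Int × ((Int × Int) × List Int)))) :
    Decidable (Spec_create_index_map_py nin nout hw out) := by
  unfold Spec_create_index_map_py; infer_instance

-- ===== CLAIM (what is proved, stated in full; the proofs are below) =====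
def Claim_equal_create_index_map_py : Prop := ∀ (nin : Int) (nout : Int) (hw : Int), Dom_create_index_map_py nin nout hw → Pre_create_index_map_py nin nout hw → Spec_create_index_map_py nin nout hw (create_index_map_py nin nout hw)

-- ===== LEMMAS AND PROOFS =====

-- closed-form row data: band bounds, band width prefix sum pvT
def pvJmn (hw i : Int) : Int := max 0 (i - hw)
def pvJmx (nin hw i : Int) : Int := min (i + hw + 1) nin
def pvT (nin hw : Int) : Nat → Int
  | 0 => 0
  | m+1 => pvT nin hw m + max 0 (pvJmx nin hw (m : Int) - pvJmn hw (m : Int))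
def pvIJ (nin hw : Int) : Nat → List (Int × (Int × Int) × (Int × Int))
  | 0 => []
  | m+1 => pvIJ nin hw m ++ [((m : Int), (pvJmn hw (m : Int), pvJmx nin hw (m : Int)),
      (pvT nin hw m, pvT nin hw m + pvJmx nin hw (m : Int) - pvJmn hw (m : Int)))]
def pvCol (nin hw : Int) : Nat → Int → List (Int × Int)
  | 0, _ => []
  | m+1, j => if pvJmn hw (m : Int) ≤ j ∧ j < pvJmx nin hw (m : Int)
      then pvCol nin hw m j ++ [((m : Int), pvT nin hw m + (j - pvJmn hw (m : Int)))]
      else pvCol nin hw m j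
def pvTS (nin hw : Int) : Nat → List Int
  | 0 => []
  | m+1 => pvTS nin hw m ++ [pvT nin hw m - pvJmn hw (m : Int)]

lemma pvRangeToNat (n : Int) : PySem.List.pyRange 0 n 1 = PySem.List.pyRange 0 (n.toNat : Int) 1 := by
  by_cases h : 0 ≤ n
  · rw [Int.toNat_of_nonneg h]
  · rw [PySem.List.pyRange_one_eq_nil (by omega), PySem.List.pyRange_one_eq_nil (by omega)]

lemma pvInnerA (nin i : Int) : ∀ (n : Nat) (a b t : Int) (g : Int → List (Int × Int)), n = (b - a).toNat →
    (PySem.List.pyRange a b 1).foldl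
      (fun (ct : List (List (Int × Int)) × Int) j =>
        if 0 ≤ j ∧ j < nin then (ct.1.modify j.toNat (fun c => c ++ [(i, ct.2)]), ct.2 + 1)
        else ct)
      ((PySem.List.pyRange 0 nin 1).map g, t)
    = ((PySem.List.pyRange 0 nin 1).map (fun j =>
         if max 0 a ≤ j ∧ j < min b nin then g j ++ [(i, t + (j - max 0 a))] else g j),
       t + max 0 (min b nin - max 0 a)) := by
  intro n
  induction n with
  | zero =>
    intro a b t g hn
    rw [show PySem.List.pyRange a b 1 = [] from PySem.List.pyRange_one_eq_nil (by omega)]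
    have e1 : (PySem.List.pyRange 0 nin 1).map (fun j =>
        if max 0 a ≤ j ∧ j < min b nin then g j ++ [(i, t + (j - max 0 a))] else g j)
        = (PySem.List.pyRange 0 nin 1).map g := by
      apply List.map_congr_left
      intro j _
      have hc : ¬ (max 0 a ≤ j ∧ j < min b nin) := by omega
      rw [if_neg hc]
    have e2 : t + max 0 (min b nin - max 0 a) = t := by omega
    rw [List.foldl_nil, e1, e2]
  | succ n ih =>
    intro a b t g hn
    have hab : a < b := by omega
    rw [PySem.List.pyRange_one_cons hab]
    simp only [List.foldl_cons]
    by_cases hg : 0 ≤ a ∧ a < nin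
    · rw [if_pos hg]
      have hmod : ((PySem.List.pyRange 0 nin 1).map g).modify a.toNat (fun c => c ++ [(i, t)])
          = (PySem.List.pyRange 0 nin 1).map (fun j => if j = a then g j ++ [(i, t)] else g j) := by
        apply List.ext_getElem
        · simp [List.length_modify]
        · intro k h1 h2
          rw [List.getElem_modify]
          simp only [List.getElem_map, PySem.List.getElem_pyRange_one]
          have hk : k < nin.toNat := by
            have := h2; simpa [PySem.List.length_pyRange_one] using this
          split_ifs with h3 h4 h4 <;> first | rfl | (exfalso; omega)
      rw [hmod, ih (a + 1) b (t + 1) _ (by omega)]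
      have e1 : (PySem.List.pyRange 0 nin 1).map (fun j =>
          if max 0 (a + 1) ≤ j ∧ j < min b nin
          then (if j = a then g j ++ [(i, t)] else g j) ++ [(i, t + 1 + (j - max 0 (a + 1)))]
          else (if j = a then g j ++ [(i, t)] else g j))
          = (PySem.List.pyRange 0 nin 1).map (fun j =>
          if max 0 a ≤ j ∧ j < min b nin then g j ++ [(i, t + (j - max 0 a))] else g j) := by
        apply List.map_congr_left
        intro j hj
        have hjm := PySem.List.mem_pyRange_one.mp hj
        split_ifs with h1 h2 h2 h3 h3 <;>
          first
            | rfl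
            | (exfalso; omega)
            | (simp only [List.append_right_inj, List.cons.injEq, Prod.mk.injEq,
                true_and, and_true]; omega)
      have e2 : t + 1 + max 0 (min b nin - max 0 (a + 1)) = t + max 0 (min b nin - max 0 a) := by
        omega
      rw [e1, e2]
    · rw [if_neg hg]
      rw [ih (a + 1) b t g (by omega)]
      have e1 : (PySem.List.pyRange 0 nin 1).map (fun j =>
          if max 0 (a + 1) ≤ j ∧ j < min b nin then g j ++ [(i, t + (j - max 0 (a + 1)))] else g j)
          = (PySem.List.pyRange 0 nin 1).map (fun j =>
          if max 0 a ≤ j ∧ j < min b nin then g j ++ [(i, t + (j - max 0 a))] else g j) := by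
        apply List.map_congr_left
        intro j hj
        have hjm := PySem.List.mem_pyRange_one.mp hj
        split_ifs with h1 h2 h2 <;>
          first
            | rfl
            | (exfalso; omega)
            | (simp only [List.append_right_inj, List.cons.injEq, Prod.mk.injEq,
                true_and, and_true]; omega)
      have e2 : t + max 0 (min b nin - max 0 (a + 1)) = t + max 0 (min b nin - max 0 a) := by
        omega
      rw [e1, e2]

lemma pvOuterA (nin hw : Int) (m : Nat) :
    (PySem.List.pyRange 0 (m : Int) 1).foldl
      (fun (st : List (Int × (Int × Int) × (Int × Int)) × List (List (Int × Int)) × Int) i =>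
        let jmin := max 0 (i - hw)
        let jmax := min (i + hw + 1) nin
        let ij := st.1 ++ [(i, (jmin, jmax), (st.2.2, st.2.2 + jmax - jmin))]
        let ct := (PySem.List.pyRange (i - hw) (i + hw + 1) 1).foldl
          (fun (ct : List (List (Int × Int)) × Int) j =>
            if 0 ≤ j ∧ j < nin then (ct.1.modify j.toNat (fun c => c ++ [(i, ct.2)]), ct.2 + 1)
            else ct) (st.2.1, st.2.2)
        (ij, ct.1, ct.2))
      ([], (PySem.List.pyRange 0 nin 1).map (fun _ => []), 0)
    = (pvIJ nin hw m, (PySem.List.pyRange 0 nin 1).map (pvCol nin hw m), pvT nin hw m) := by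
  induction m with
  | zero =>
    rw [show ((0 : Nat) : Int) = 0 from rfl,
      show PySem.List.pyRange 0 0 1 = [] from PySem.List.pyRange_one_eq_nil (by omega)]
    rw [List.foldl_nil]
    have e1 : (PySem.List.pyRange 0 nin 1).map (fun _ => ([] : List (Int × Int)))
        = (PySem.List.pyRange 0 nin 1).map (pvCol nin hw 0) :=
      List.map_congr_left (fun j _ => rfl)
    rw [e1]; rfl
  | succ m ih =>
    rw [show ((m + 1 : Nat) : Int) = (m : Int) + 1 by push_cast; ring,
      PySem.List.pyRange_one_succ_right (by positivity),
      List.foldl_append, ih, List.foldl_cons, List.foldl_nil]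
    dsimp only
    rw [pvInnerA nin (m : Int) ((((m : Int) + hw + 1) - ((m : Int) - hw)).toNat)
      ((m : Int) - hw) ((m : Int) + hw + 1) (pvT nin hw m) (pvCol nin hw m) rfl]
    refine Prod.ext ?_ (Prod.ext ?_ ?_)
    · simp only [pvIJ, pvJmn, pvJmx, max_comm (0 : Int)]
    · dsimp only
      apply List.map_congr_left
      intro j _
      show _ = pvCol nin hw (m + 1) j
      rw [pvCol]
      simp only [pvJmn, pvJmx, max_comm (0 : Int)]
    · show pvT nin hw m + max 0 (min ((m : Int) + hw + 1) nin - max 0 ((m : Int) - hw))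
        = pvT nin hw (m + 1)
      rw [pvT]
      simp only [pvJmn, pvJmx, max_comm (0 : Int)]

lemma pvOuterB (nin hw : Int) (m : Nat) :
    (PySem.List.pyRange 0 (m : Int) 1).foldl
      (fun (st : List (Int × (Int × Int) × (Int × Int)) × List Int × Int) i =>
        let jmin := max 0 (i - hw)
        let jmax := min (i + hw + 1) nin
        (st.1 ++ [(i, (jmin, jmax), (st.2.2, st.2.2 + jmax - jmin))],
         st.2.1 ++ [st.2.2 - jmin],
         st.2.2 + max 0 (jmax - jmin)))
      ([], [], 0)
    = (pvIJ nin hw m, pvTS nin hw m, pvT nin hw m) := by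
  induction m with
  | zero =>
    rw [show ((0 : Nat) : Int) = 0 from rfl,
      show PySem.List.pyRange 0 0 1 = [] from PySem.List.pyRange_one_eq_nil (by omega)]
    rfl
  | succ m ih =>
    rw [show ((m + 1 : Nat) : Int) = (m : Int) + 1 by push_cast; ring,
      PySem.List.pyRange_one_succ_right (by positivity),
      List.foldl_append, ih, List.foldl_cons, List.foldl_nil]
    dsimp only
    refine Prod.ext ?_ (Prod.ext ?_ ?_)
    · simp only [pvIJ, pvJmn, pvJmx]
    · simp only [pvTS, pvJmn]
    · simp only [pvT, pvJmn, pvJmx]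

lemma pvColChar (nin hw j : Int) (h0 : 0 ≤ j) (hj : j < nin) : ∀ (m : Nat),
    pvCol nin hw m j = (PySem.List.pyRange (max 0 (j - hw)) (min (j + hw + 1) (m : Int)) 1).map
      (fun i => (i, pvT nin hw i.toNat + (j - max 0 (i - hw)))) := by
  intro m
  induction m with
  | zero =>
    rw [pvCol, show PySem.List.pyRange (max 0 (j - hw)) (min (j + hw + 1) ((0 : Nat) : Int)) 1 = []
      from PySem.List.pyRange_one_eq_nil (by omega)]
    rfl
  | succ m ih =>
    rw [pvCol]
    by_cases hc : pvJmn hw (m : Int) ≤ j ∧ j < pvJmx nin hw (m : Int)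
    · rw [if_pos hc]
      unfold pvJmn pvJmx at hc
      have h1 : max 0 (j - hw) ≤ (m : Int) := by omega
      rw [show min (j + hw + 1) ((m : Nat) : Int) = (m : Int) by omega] at ih
      rw [ih, show min (j + hw + 1) ((m + 1 : Nat) : Int) = (m : Int) + 1 by push_cast; omega,
        PySem.List.pyRange_one_succ_right h1, List.map_append]
      simp only [List.map_cons, List.map_nil, Int.toNat_natCast, pvJmn]
    · rw [if_neg hc]
      unfold pvJmn pvJmx at hc
      rcases (by omega : (m : Int) < max 0 (j - hw) ∨ j + hw + 1 ≤ (m : Int)) with h | h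
      · rw [show PySem.List.pyRange (max 0 (j - hw)) (min (j + hw + 1) ((m : Nat) : Int)) 1 = []
            from PySem.List.pyRange_one_eq_nil (by omega)] at ih
        rw [ih, show PySem.List.pyRange (max 0 (j - hw)) (min (j + hw + 1) ((m + 1 : Nat) : Int)) 1 = []
            from PySem.List.pyRange_one_eq_nil (by push_cast; omega)]
      · rw [ih, show min (j + hw + 1) ((m + 1 : Nat) : Int) = min (j + hw + 1) ((m : Nat) : Int)
            by push_cast; omega]

lemma pvTSChar (nin hw : Int) (m : Nat) :
    pvTS nin hw m = (List.range m).map (fun k => pvT nin hw k - pvJmn hw (k : Int)) := by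
  induction m with
  | zero => rfl
  | succ m ih => rw [pvTS, ih, List.range_succ, List.map_append]; rfl

lemma pvMin_pyRange (a b : Int) (h : a < b) :
    PySem.List.min? (PySem.List.pyRange a b 1) (fun x => x) = some a := by
  cases hm : PySem.List.min? (PySem.List.pyRange a b 1) (fun x => x) with
  | none =>
    rw [PySem.List.min?_eq_none_iff] at hm
    have := PySem.List.mem_pyRange_one.mpr (show a ≤ a ∧ a < b by omega)
    simp [hm] at this
  | some m =>
    have hmem := PySem.List.min?_mem hm
    have hle := PySem.List.min?_isMin hm a (PySem.List.mem_pyRange_one.mpr (by omega))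
    have h2 := (PySem.List.mem_pyRange_one.mp hmem).1
    have h3 : m ≤ a := hle
    have : m = a := by omega
    rw [this]

lemma pvMax_pyRange (a b : Int) (h : a < b) :
    PySem.List.max? (PySem.List.pyRange a b 1) (fun x => x) = some (b - 1) := by
  cases hm : PySem.List.max? (PySem.List.pyRange a b 1) (fun x => x) with
  | none =>
    rw [PySem.List.max?_eq_none_iff] at hm
    have := PySem.List.mem_pyRange_one.mpr (show a ≤ a ∧ a < b by omega)
    simp [hm] at this
  | some m =>
    have hmem := PySem.List.max?_mem hm
    have hle := PySem.List.max?_isMax hm (b - 1) (PySem.List.mem_pyRange_one.mpr (by omega))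
    have h2 := (PySem.List.mem_pyRange_one.mp hmem).2
    have h3 : b - 1 ≤ m := hle
    have : m = b - 1 := by omega
    rw [this]

-- ===== VERDICT (by name: the statement is the Claim_ definition above) =====
theorem create_index_map_py_spec : Claim_equal_create_index_map_py := by
  intro nin nout hw hdom hpre
  unfold Spec_create_index_map_py create_index_map_py create_index_map_py_alt
  simp only []
  rw [pvRangeToNat nout, pvOuterA nin hw nout.toNat, pvOuterB nin hw nout.toNat]
  dsimp only
  rw [PySem.List.foldl_append_singleton_eq_map, List.nil_append,
    PySem.List.enumerate_eq_map_pyRange (d := ([] : List (Int × Int))), List.map_map]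
  congr 1
  simp only [PySem.List.len_eq, List.length_map, PySem.List.length_pyRange_one, Int.sub_zero]
  rw [← pvRangeToNat nin]
  apply List.map_congr_left
  intro j hj
  have hjm := PySem.List.mem_pyRange_one.mp hj
  have hp : 0 ≤ hw ∧ 1 ≤ nout ∧ nin ≤ nout + hw := by
    unfold Pre_create_index_map_py at hpre
    rcases hpre with h | h
    · omega
    · exact h
  have hN : ((nout.toNat : Nat) : Int) = nout := Int.toNat_of_nonneg (by omega)
  simp only [Function.comp_apply]
  rw [PySem.List.pyGetD_map_pyRange_of_nonneg _ _ _ _ hjm.1 hjm.2,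
    pvColChar nin hw j hjm.1 hjm.2 nout.toNat, hN]
  unfold pySlitIt
  simp only [List.map_map]
  have hlt : max 0 (j - hw) < min (j + hw + 1) nout := by omega
  simp only [Function.comp_def, List.map_id']
  rw [pvMin_pyRange _ _ hlt, pvMax_pyRange _ _ hlt]
  simp only [Option.getD_some]
  rw [show min (j + hw + 1) nout - 1 + 1 = min (j + hw + 1) nout by ring]
  congr 1
  congr 1
  apply List.map_congr_left
  intro i hi
  have him := PySem.List.mem_pyRange_one.mp hi
  rw [pvTSChar]
  have hi1 : i < ((nout.toNat : Nat) : Int) := by omega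
  have hi0 : (0 : Int) ≤ i := by omega
  rw [PySem.List.pyGetD_eq_getElem _ 0 hi0 (by simpa using hi1)]
  simp only [List.getElem_map, List.getElem_range]
  unfold pvJmn
  rw [Int.toNat_of_nonneg hi0]
  omega
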